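-- pv_equiv track=rewrite | github.com/fmaa23/sim_rl | foundations/base_functions.py | make_unique_edge_type
-- ===== SOURCE A (Python) =====
-- def make_unique_edge_type(adjacent_list, edge_list):
--     """
--     Assigns a unique edge type to connections between nodes based on the adjacency and edge lists.
--
--     Parameters:
--     - adjacent_list (dict): A dictionary representing the network's adjacency list.
--     - edge_list (dict): A dictionary representing the network's edge list, indicating connections between nodes.
--
--     Returns:
--     - dict: A dictionary where keys are node identifiers, and values are lists of unique edge types for edges ending at that node.
--     """
--     connection_info = get_connection_info(adjacent_list)
--     edge_type_info = {}
--     for end_node in connection_info.keys():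
--         start_node_list = connection_info[end_node]
--         edge_type_list = []
--         for start_node in start_node_list:
--             edge_type = edge_list[start_node][end_node]
--             edge_type_list.append(edge_type)
--         edge_type_info[end_node] = edge_type_list
--
--     return edge_type_info # keys are node_id, values are the edge_types
--
-- def get_connection_info(adjacent_list):
--     """
--     Generates a dictionary mapping each node to a list of nodes that connect to it.
--
--     Parameters:
--     - adjacent_list (dict): A dictionary representing the network's adjacency list.
--
--     Returns:
--     - dict: A dictionary where keys are end nodes, and values are lists of start nodes that connect to these end nodes.
--     """
--     connection_info = {}
--     for start_node in adjacent_list.keys():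
--         for end_node in adjacent_list[start_node]:
--             connect_start_node_list = connection_info.setdefault(end_node, [])
--             connect_start_node_list.append(start_node)
--             connection_info[end_node] = connect_start_node_list
--
--     return connection_info
-- ===== SOURCE B (Python) =====
-- def make_unique_edge_type(adjacent_list, edge_list):
--     # Comprehension-based rewrite: first list the distinct end nodes in
--     # first-appearance order, then build each node's incoming edge-type list
--     # declaratively by scanning the adjacency per node -- no dict mutation,
--     # no setdefault, no intermediate reverse-adjacency table.
--     seen = []
--     for ends in adjacent_list.values():
--         for e in ends:
--             if e not in seen:
--                 seen.append(e)
--     return {e: [edge_list[s][e]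
--                 for s, ends in adjacent_list.items()
--                 for e2 in ends if e2 == e]
--             for e in seen}
-- ===== Notes on version B (the rewrite author's own statement) =====
-- stated objective: alternative
-- what changed: B replaces A's two mutation phases (build a reverse-adjacency dict with setdefault/append, then a second lookup pass) with a declarative comprehension: collect distinct end nodes in first-appearance order, then compute each node's incoming edge-type list by filtering the adjacency, trading O(E) dict mutation for one adjacency scan per end node.
import Mathlib
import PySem

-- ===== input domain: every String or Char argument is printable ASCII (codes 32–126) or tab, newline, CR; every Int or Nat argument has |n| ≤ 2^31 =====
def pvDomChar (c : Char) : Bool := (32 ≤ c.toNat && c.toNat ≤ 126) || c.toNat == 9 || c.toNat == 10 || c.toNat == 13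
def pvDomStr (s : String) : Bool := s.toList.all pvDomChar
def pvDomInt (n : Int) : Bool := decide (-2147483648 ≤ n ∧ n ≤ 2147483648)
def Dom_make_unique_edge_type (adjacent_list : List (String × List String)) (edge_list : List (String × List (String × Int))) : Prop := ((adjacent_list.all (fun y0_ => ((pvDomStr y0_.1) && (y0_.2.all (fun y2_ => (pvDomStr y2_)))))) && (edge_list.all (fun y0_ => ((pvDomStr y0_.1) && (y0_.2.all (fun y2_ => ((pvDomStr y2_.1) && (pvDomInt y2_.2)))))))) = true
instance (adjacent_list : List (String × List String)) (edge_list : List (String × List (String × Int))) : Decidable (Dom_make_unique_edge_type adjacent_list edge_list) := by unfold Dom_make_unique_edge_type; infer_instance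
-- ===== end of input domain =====

-- B replaces A's two mutation phases (reverse-adjacency dict + second lookup pass) with a declarative comprehension over the distinct end nodes; objective: alternative.


-- ===== PORT A =====
-- edge_list[start_node][end_node]: two dict lookups; `none` is Python's KeyError, excluded by Pre_ (the 0 default is never reached on Pre_)
def pvEdgeTypeA (edge_list : List (String × List (String × Int))) (s e : String) : Int :=
  ((((PySem.Dict.ofList edge_list).get? s).bind
      (fun inner => (PySem.Dict.ofList inner).get? e)).getD 0)

-- helper get_connection_info; Python's setdefault(end_node, []) + list.append(start_node) + re-assignment = Dict.modify with default []
def get_connection_info (adjacent_list : List (String × List String)) : PySem.Dict String (List String) :=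
  (PySem.Dict.ofList adjacent_list).items.foldl
    (fun ci p => p.2.foldl (fun ci e => ci.modify e [] (fun l => l ++ [p.1])) ci)
    PySem.Dict.empty

def make_unique_edge_type (adjacent_list : List (String × List String)) (edge_list : List (String × List (String × Int))) : List (String × List Int) :=
  ((get_connection_info adjacent_list).items.foldl
    (fun eti p =>
      eti.insert p.1 (p.2.foldl (fun lst s => lst ++ [pvEdgeTypeA edge_list s p.1]) []))
    PySem.Dict.empty).items

-- ===== PORT B =====
-- the same Python expression edge_list[start_node][end_node]; `none` = KeyError, excluded by Pre_
def pvEdgeTypeB (edge_list : List (String × List (String × Int))) (s e : String) : Int :=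
  ((((PySem.Dict.ofList edge_list).get? s).bind
      (fun inner => (PySem.Dict.ofList inner).get? e)).getD 0)

-- B's `seen` list with its `if e not in seen: seen.append(e)` is exactly a PySem.Set built by add
def pvSeen (adjacent_list : List (String × List String)) : PySem.Set String :=
  (PySem.Dict.ofList adjacent_list).values.foldl
    (fun seen ends => ends.foldl PySem.Set.add seen) []

-- the inner list comprehension [edge_list[s][e] for s, ends in adjacent_list.items() for e2 in ends if e2 == e]
def pvEdgeTypesFor (adjacent_list : List (String × List String)) (edge_list : List (String × List (String × Int))) (e : String) : List Int :=
  (PySem.Dict.ofList adjacent_list).items.flatMap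
    (fun p => (p.2.filter (fun e2 => e2 == e)).map (fun _ => pvEdgeTypeB edge_list p.1 e))

-- the dict comprehension: `seen` holds distinct keys, so the resulting dict's items are this map
def make_unique_edge_type_alt (adjacent_list : List (String × List String)) (edge_list : List (String × List (String × Int))) : List (String × List Int) :=
  (pvSeen adjacent_list).map (fun e => (e, pvEdgeTypesFor adjacent_list edge_list e))

-- ===== PRECONDITION & SPEC =====
-- Pre_ excludes exactly the inputs on which Python's A raises KeyError: some (start, end) pair of the
-- adjacency dict has no entry edge_list[start][end]. B raises the same KeyError on those inputs.
def Pre_make_unique_edge_type (adjacent_list : List (String × List String)) (edge_list : List (String × List (String × Int))) : Prop :=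
  ∀ p ∈ (PySem.Dict.ofList adjacent_list).items, ∀ e ∈ p.2,
    (((PySem.Dict.ofList edge_list).get? p.1).bind
      (fun inner => (PySem.Dict.ofList inner).get? e)).isSome = true
instance (adjacent_list : List (String × List String)) (edge_list : List (String × List (String × Int))) : Decidable (Pre_make_unique_edge_type adjacent_list edge_list) := by unfold Pre_make_unique_edge_type; infer_instance
def pvWitness_make_unique_edge_type : (List (String × List String)) × (List (String × List (String × Int))) :=
  ([("a", ["b", "c"]), ("b", ["c"])], [("a", [("b", 1), ("c", 2)]), ("b", [("c", 3)])])
def Spec_make_unique_edge_type (adjacent_list : List (String × List String)) (edge_list : List (String × List (String × Int))) (out : List (String × List Int)) : Prop := out = make_unique_edge_type_alt adjacent_list edge_list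
instance (adjacent_list : List (String × List String)) (edge_list : List (String × List (String × Int))) (out : List (String × List Int)) : Decidable (Spec_make_unique_edge_type adjacent_list edge_list out) := by unfold Spec_make_unique_edge_type; infer_instance

-- ===== CLAIM (what is proved, stated in full; the proofs are below) =====
def Claim_equal_make_unique_edge_type : Prop := ∀ (adjacent_list : List (String × List String)) (edge_list : List (String × List (String × Int))), Dom_make_unique_edge_type adjacent_list edge_list → Pre_make_unique_edge_type adjacent_list edge_list → Spec_make_unique_edge_type adjacent_list edge_list (make_unique_edge_type adjacent_list edge_list)

-- ===== LEMMAS AND PROOFS =====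

-- the (end_node, start_node) pairs of the adjacency, flattened in traversal order
def pvPairs (adjacent_list : List (String × List String)) : List (String × String) :=
  (PySem.Dict.ofList adjacent_list).items.flatMap (fun p => p.2.map (fun e => (e, p.1)))

-- A's nested get_connection_info loop is the flat grouping fold over pvPairs
theorem pv_conn_flat_aux (ps : List (String × List String)) (d : PySem.Dict String (List String)) :
    ps.foldl (fun ci p => p.2.foldl (fun ci e => ci.modify e [] (fun l => l ++ [p.1])) ci) d
      = (ps.flatMap (fun p => p.2.map (fun e => (e, p.1)))).foldl
          (fun ci q => ci.modify q.1 [] (fun l => l ++ [q.2])) d := by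
  induction ps generalizing d with
  | nil => rfl
  | cons p t ih =>
    simp only [List.foldl_cons, List.flatMap_cons, List.foldl_append, List.foldl_map]
    exact ih _

theorem pv_conn_flat (al : List (String × List String)) :
    get_connection_info al
      = (pvPairs al).foldl (fun ci q => ci.modify q.1 [] (fun l => l ++ [q.2])) PySem.Dict.empty :=
  pv_conn_flat_aux _ _

theorem pv_conn_keys (al : List (String × List String)) :
    (get_connection_info al).keys = PySem.Set.ofList ((pvPairs al).map (·.1)) := by
  rw [pv_conn_flat]
  have h := PySem.Dict.keys_foldl_modify_key (l := pvPairs al) (key := Prod.fst)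
    (d0 := ([] : List String)) (f := fun _ q => (fun l => l ++ [q.2]))
    (d := (PySem.Dict.empty : PySem.Dict String (List String)))
  simpa [PySem.Dict.keys_empty, PySem.Set.update_nil_left] using h

theorem pv_conn_nodup (al : List (String × List String)) :
    (get_connection_info al).keys.Nodup := by
  rw [pv_conn_keys]; exact PySem.Set.nodup_ofList _

theorem pv_conn_getD (al : List (String × List String)) (e : String) :
    (get_connection_info al).getD e []
      = ((pvPairs al).filter (fun q => q.1 == e)).map (·.2) := by
  rw [pv_conn_flat]
  have h := PySem.Dict.getD_foldl_modify_append (l := pvPairs al)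
    (d := (PySem.Dict.empty : PySem.Dict String (List String))) (c := e)
  simpa [PySem.Dict.getD_empty] using h

-- B's seen list equals the distinct first components of pvPairs
theorem pv_seen_main (t : List (String × List String)) (s : PySem.Set String) :
    t.foldl (fun seen q => q.2.foldl PySem.Set.add seen) s
      = PySem.Set.update s (t.flatMap (fun q => q.2)) := by
  induction t generalizing s with
  | nil => simp [PySem.Set.update_nil]
  | cons q u ihu =>
    simp only [List.foldl_cons, List.flatMap_cons]
    have hadd : q.2.foldl PySem.Set.add s = PySem.Set.update s q.2 := by
      have := PySem.Set.update_map_eq_foldl_add (s := s) (l := q.2) (f := id)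
      simpa using this.symm
    rw [hadd, PySem.Set.update_append, ihu]

theorem pv_seen_eq (al : List (String × List String)) :
    pvSeen al = PySem.Set.ofList ((pvPairs al).map (·.1)) := by
  unfold pvSeen pvPairs
  simp only [PySem.Dict.values, List.foldl_map]
  rw [pv_seen_main, PySem.Set.update_nil_left]
  congr 1
  rw [List.map_flatMap]
  apply List.flatMap_congr
  intro p _
  simp [List.map_map, Function.comp_def]

-- per end node, B's comprehension equals A's mapped reverse-adjacency entry
theorem pv_value_eq (al : List (String × List String)) (el : List (String × List (String × Int))) (e : String) :
    (((pvPairs al).filter (fun q => q.1 == e)).map (·.2)).map (fun s => pvEdgeTypeA el s e)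
      = pvEdgeTypesFor al el e := by
  unfold pvPairs pvEdgeTypesFor
  simp only [List.map_map, List.filter_flatMap, List.map_flatMap]
  apply List.flatMap_congr  -- pointwise over the adjacency items
  intro p _
  simp only [List.filter_map, List.map_map]
  rfl

-- ===== VERDICT (by name: the statement is the Claim_ definition above) =====
theorem make_unique_edge_type_spec : Claim_equal_make_unique_edge_type := by
  intro al el _ _
  unfold Spec_make_unique_edge_type make_unique_edge_type make_unique_edge_type_alt
  -- A side: the inner append-fold is a map, then the fresh-key inserts append the mapped items
  have hA : ((get_connection_info al).items.foldl
      (fun eti p => eti.insert p.1 (p.2.foldl (fun lst s => lst ++ [pvEdgeTypeA el s p.1]) []))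
      PySem.Dict.empty).items
      = (get_connection_info al).items.map (fun p => (p.1, p.2.map (fun s => pvEdgeTypeA el s p.1))) := by
    have := PySem.Dict.items_foldl_insert_fresh (get_connection_info al).items
      (fun p => p.1) (fun p => p.2.map (fun s => pvEdgeTypeA el s p.1))
      (PySem.Dict.empty : PySem.Dict String (List Int))
      (fun _ _ => PySem.Dict.contains_empty _) (pv_conn_nodup al)
    simp only [PySem.List.foldl_append_singleton_eq_map, List.nil_append] at this ⊢
    rw [this]
    rfl
  rw [hA]
  rw [PySem.Dict.items_eq_map_keys (get_connection_info al) (pv_conn_nodup al) []]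
  simp only [List.map_map]
  rw [pv_conn_keys, ← pv_seen_eq]
  apply List.map_congr_left
  intro e _
  simp only [Function.comp]
  rw [show (get_connection_info al).getD e [] = ((pvPairs al).filter (fun q => q.1 == e)).map (·.2) from pv_conn_getD al e]
  rw [← pv_value_eq al el e]
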